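-- pv_equiv track=rewrite | github.com/TheRealCubeAD/DSA | FuzzySchafkopf1.1.py | anzahlNichtTrumpfSau
-- ===== SOURCE A (Python) =====
-- def anzahlNichtTrumpfSau(Blatt, farbe):
--     a = 0
--     sau = [5, 11, 17, 23]
--     del sau[farbe]
--     for i in range(0, len(Blatt)):
--         if sau.count(Blatt[i]) == 1:
--             a = a + 1
--     return a
-- ===== SOURCE B (Python) =====
-- def anzahlNichtTrumpfSau(Blatt, farbe):
--     ACES = [5, 11, 17, 23]
--     trumpf_sau = ACES[farbe]
--     total = sum(1 for x in Blatt if x in ACES)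
--     return total - Blatt.count(trumpf_sau)
-- ===== Notes on version B (the rewrite author's own statement) =====
-- stated objective: alternative
-- what changed: B never builds the reduced ace list: it counts all four aces in one generator pass and subtracts the count of the trump-colour ace looked up by index, instead of deleting from the list and testing each card against the remainder.
import Mathlib
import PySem

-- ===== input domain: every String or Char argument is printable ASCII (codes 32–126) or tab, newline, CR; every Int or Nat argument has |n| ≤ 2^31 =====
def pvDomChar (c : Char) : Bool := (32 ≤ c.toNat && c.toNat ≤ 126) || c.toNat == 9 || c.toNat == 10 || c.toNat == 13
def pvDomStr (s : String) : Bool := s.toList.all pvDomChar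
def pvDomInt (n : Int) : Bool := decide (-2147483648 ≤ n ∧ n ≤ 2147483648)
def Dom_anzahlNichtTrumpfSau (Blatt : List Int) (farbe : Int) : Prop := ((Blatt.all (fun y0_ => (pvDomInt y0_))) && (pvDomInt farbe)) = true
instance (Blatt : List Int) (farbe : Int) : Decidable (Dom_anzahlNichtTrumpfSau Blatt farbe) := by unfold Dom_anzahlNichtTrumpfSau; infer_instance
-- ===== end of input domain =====

-- B never builds the reduced ace list: it counts all four aces in one pass and subtracts the
-- count of the indexed trump ace (objective: alternative algorithm, same cost).

-- ===== PORT A =====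
def anzahlNichtTrumpfSau (Blatt : List Int) (farbe : Int) : Int :=
  -- a = 0; sau = [5,11,17,23]; del sau[farbe]  (pop? = none would be Python's IndexError, excluded by Pre_)
  match PySem.List.pop? ([5, 11, 17, 23] : List Int) farbe with
  | none => 0
  | some (_, sau) =>
    -- for i in range(0, len(Blatt)): if sau.count(Blatt[i]) == 1: a = a + 1
    (PySem.List.pyRange 0 (Blatt.length : Int) 1).foldl
      (fun a i => if PySem.List.count sau (PySem.List.pyGetD Blatt i 0) == 1 then a + 1 else a) 0

-- ===== PORT B =====
def anzahlNichtTrumpfSau_alt (Blatt : List Int) (farbe : Int) : Int :=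
  -- trumpf_sau = ACES[farbe]  (pyGet? = none would be Python's IndexError, excluded by Pre_)
  match PySem.List.pyGet? ([5, 11, 17, 23] : List Int) farbe with
  | none => 0
  | some trumpf =>
    -- total = sum(1 for x in Blatt if x in ACES); return total - Blatt.count(trumpf_sau)
    ((Blatt.countP (fun x => x == 5 || x == 11 || x == 17 || x == 23) : Nat) : Int)
      - (PySem.List.count Blatt trumpf : Int)

-- ===== PRECONDITION & SPEC =====
-- Pre_ excludes exactly the inputs where `del sau[farbe]` raises IndexError (farbe outside -4..3).
def Pre_anzahlNichtTrumpfSau (Blatt : List Int) (farbe : Int) : Prop := -4 ≤ farbe ∧ farbe < 4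
instance (Blatt : List Int) (farbe : Int) : Decidable (Pre_anzahlNichtTrumpfSau Blatt farbe) := by unfold Pre_anzahlNichtTrumpfSau; infer_instance

def pvWitness_anzahlNichtTrumpfSau : List Int × Int := ([5, 11, 7, 23, 23], 2)

def Spec_anzahlNichtTrumpfSau (Blatt : List Int) (farbe : Int) (out : Int) : Prop := out = anzahlNichtTrumpfSau_alt Blatt farbe
instance (Blatt : List Int) (farbe : Int) (out : Int) : Decidable (Spec_anzahlNichtTrumpfSau Blatt farbe out) := by unfold Spec_anzahlNichtTrumpfSau; infer_instance

-- ===== CLAIM =====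
def Claim_equal_anzahlNichtTrumpfSau : Prop := ∀ (Blatt : List Int) (farbe : Int), Dom_anzahlNichtTrumpfSau Blatt farbe → Pre_anzahlNichtTrumpfSau Blatt farbe → Spec_anzahlNichtTrumpfSau Blatt farbe (anzahlNichtTrumpfSau Blatt farbe)

-- ===== LEMMAS AND PROOFS =====

-- the membership test A performs equals the three-way disjunction (sau has distinct entries)
lemma pred_eq (v1 v2 v3 : Int) (h12 : v1 ≠ v2) (h13 : v1 ≠ v3) (h23 : v2 ≠ v3) (x : Int) :
    (List.count x [v1, v2, v3] == 1) = (x == v1 || x == v2 || x == v3) := by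
  simp only [List.count_cons, List.count_nil]
  by_cases e1 : x = v1 <;> by_cases e2 : x = v2 <;> by_cases e3 : x = v3 <;>
    subst_eqs <;> simp_all [Ne.symm h12, Ne.symm h13, Ne.symm h23] <;>
    simp [Ne.symm e1, Ne.symm e2, Ne.symm e3, e1, e2, e3]

-- countP of a disjunction of distinct-value equality tests = sum of the occurrence counts
lemma countP_three (v1 v2 v3 : Int) (h12 : v1 ≠ v2) (h13 : v1 ≠ v3) (h23 : v2 ≠ v3)
    (Blatt : List Int) :
    Blatt.countP (fun x => x == v1 || x == v2 || x == v3)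
      = Blatt.count v1 + Blatt.count v2 + Blatt.count v3 := by
  induction Blatt with
  | nil => rfl
  | cons x B ih =>
    rw [List.countP_cons, List.count_cons, List.count_cons, List.count_cons, ih]
    by_cases e1 : x = v1 <;> by_cases e2 : x = v2 <;> by_cases e3 : x = v3 <;>
      simp [e1, e2, e3] <;> simp_all <;> omega

lemma countP_four (Blatt : List Int) :
    Blatt.countP (fun x => x == 5 || x == 11 || x == 17 || x == 23)
      = Blatt.count 5 + Blatt.count 11 + Blatt.count 17 + Blatt.count 23 := by
  induction Blatt with
  | nil => rfl
  | cons x B ih =>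
    rw [List.countP_cons, List.count_cons, List.count_cons, List.count_cons, List.count_cons, ih]
    by_cases e1 : x = (5:Int) <;> by_cases e2 : x = (11:Int) <;>
      by_cases e3 : x = (17:Int) <;> by_cases e4 : x = (23:Int) <;>
      simp [e1, e2, e3, e4] <;> simp_all <;> omega

-- one branch: del left [v1,v2,v3], deleted value d; equality of A's loop with B's subtraction
lemma main_case (Blatt : List Int) (v1 v2 v3 d : Int)
    (h12 : v1 ≠ v2) (h13 : v1 ≠ v3) (h23 : v2 ≠ v3)
    (hsum : Blatt.count 5 + Blatt.count 11 + Blatt.count 17 + Blatt.count 23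
      = Blatt.count v1 + Blatt.count v2 + Blatt.count v3 + Blatt.count d) :
    (PySem.List.pyRange 0 (Blatt.length : Int) 1).foldl
        (fun a i => if PySem.List.count [v1, v2, v3] (PySem.List.pyGetD Blatt i 0) == 1 then a + 1 else a) 0
      = ((Blatt.countP (fun x => x == 5 || x == 11 || x == 17 || x == 23) : Nat) : Int)
          - (PySem.List.count Blatt d : Int) := by
  rw [PySem.List.foldl_pyRange_zero_pyGetD' Blatt 0
    (fun a x => if PySem.List.count [v1, v2, v3] x == 1 then a + 1 else a) 0]
  rw [PySem.List.foldl_if_add_one, zero_add]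
  simp only [PySem.List.count_eq]
  have hp : (fun x => List.count x [v1, v2, v3] == 1)
      = (fun x => x == v1 || x == v2 || x == v3) :=
    funext (pred_eq v1 v2 v3 h12 h13 h23)
  rw [hp, countP_three v1 v2 v3 h12 h13 h23, countP_four]
  push_cast
  omega

-- ===== VERDICT =====
theorem anzahlNichtTrumpfSau_spec : Claim_equal_anzahlNichtTrumpfSau := by
  intro Blatt farbe _ hpre
  obtain ⟨h1, h2⟩ := hpre
  unfold Spec_anzahlNichtTrumpfSau anzahlNichtTrumpfSau anzahlNichtTrumpfSau_alt
  interval_cases farbe <;>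
    exact main_case Blatt _ _ _ _ (by norm_num) (by norm_num) (by norm_num) (by ring)
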